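-- pv_equiv track=rewrite | github.com/Darkhunter9/python | Square Board.py | square_board
-- ===== SOURCE A (Python) =====
-- from typing import Tuple
--
-- Coordinate = Tuple[int, int]
--
-- def square_board(side: int, token: int, steps: int) -> Coordinate:
--     perimeter = 4*side-4
--     coord = {}
--     for i in range(perimeter):
--         if i < side:
--             coord[i] = (side-1,side-1-i)
--         elif i < 2*side-1:
--             coord[i] = (2*side-2-i,0)
--         elif i < 3*side-2:
--             coord[i] = (0,i-2*side+2)
--         else:
--             coord[i] = (i-3*side+3,side-1)
--
--     final = (token+steps+10*perimeter) %perimeter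
--     return coord[final]
-- ===== SOURCE B (Python) =====
-- def square_board(side: int, token: int, steps: int):
--     m = side - 1
--     q, r = divmod((token + steps) % (4 * m), m)
--     cx, cy = ((m, m), (m, 0), (0, 0), (0, m))[q]
--     dx, dy = ((0, -1), (-1, 0), (0, 1), (1, 0))[q]
--     return (cx + r * dx, cy + r * dy)
-- ===== Notes on version B (the rewrite author's own statement) =====
-- stated objective: faster
-- what changed: B replaces A's O(side) dict of every perimeter cell with a divmod of the final index by side-1 plus a 4-entry corner/direction table (corner + remainder*direction), O(1).
import Mathlib
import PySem

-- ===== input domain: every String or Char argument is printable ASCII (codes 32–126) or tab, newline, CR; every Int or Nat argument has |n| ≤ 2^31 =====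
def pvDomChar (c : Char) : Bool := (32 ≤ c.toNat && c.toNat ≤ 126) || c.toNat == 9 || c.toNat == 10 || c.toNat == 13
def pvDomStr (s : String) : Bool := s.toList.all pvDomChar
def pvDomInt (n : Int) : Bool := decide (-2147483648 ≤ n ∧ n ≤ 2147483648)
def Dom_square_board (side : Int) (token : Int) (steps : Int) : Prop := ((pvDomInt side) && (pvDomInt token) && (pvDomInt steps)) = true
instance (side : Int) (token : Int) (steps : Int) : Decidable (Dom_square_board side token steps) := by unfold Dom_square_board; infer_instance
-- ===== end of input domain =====

-- B replaces A's O(side) dict of all perimeter cells by an O(1) divmod + corner/direction-table computation.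


-- ===== PORT A =====
def square_board (side : Int) (token : Int) (steps : Int) : Int × Int :=
  let perimeter := 4 * side - 4
  -- the dict: Std.HashMap (keys are distinct ints; only get? is used afterwards, so order is irrelevant)
  let coord := (PySem.List.pyRange 0 perimeter 1).foldl
    (fun (d : Std.HashMap Int (Int × Int)) i =>
      if i < side then d.insert i (side - 1, side - 1 - i)
      else if i < 2 * side - 1 then d.insert i (2 * side - 2 - i, 0)
      else if i < 3 * side - 2 then d.insert i (0, i - 2 * side + 2)
      else d.insert i (i - 3 * side + 3, side - 1))
    (Std.HashMap.emptyWithCapacity)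
  let final := PySem.Int.mod (token + steps + 10 * perimeter) perimeter
  -- coord[final]: a missing key is a KeyError in Python; Pre_ guarantees the key is present.
  (coord[final]?).getD (0, 0)

-- ===== PORT B =====
def square_board_alt (side : Int) (token : Int) (steps : Int) : Int × Int :=
  let m := side - 1
  let q := PySem.Int.floordiv (PySem.Int.mod (token + steps) (4 * m)) m
  let r := PySem.Int.mod (PySem.Int.mod (token + steps) (4 * m)) m
  -- tuple indexing: q is in range under Pre_; pyGet? with a default for totality
  let c := (PySem.List.pyGet? [((m, m) : Int × Int), (m, 0), (0, 0), (0, m)] q).getD (0, 0)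
  let d := (PySem.List.pyGet? [((0, -1) : Int × Int), (-1, 0), (0, 1), (1, 0)] q).getD (0, 0)
  (c.1 + r * d.1, c.2 + r * d.2)

-- ===== PRECONDITION & SPEC =====
-- Pre_ excludes side ≤ 1, where A raises (ZeroDivisionError for side = 1, KeyError otherwise: the dict is empty).
def Pre_square_board (side : Int) (token : Int) (steps : Int) : Prop := 2 ≤ side
instance (side : Int) (token : Int) (steps : Int) : Decidable (Pre_square_board side token steps) := by unfold Pre_square_board; infer_instance
def pvWitness_square_board : Int × Int × Int := (3, 1, 2)

def Spec_square_board (side : Int) (token : Int) (steps : Int) (out : Int × Int) : Prop := out = square_board_alt side token steps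
instance (side : Int) (token : Int) (steps : Int) (out : Int × Int) : Decidable (Spec_square_board side token steps out) := by unfold Spec_square_board; infer_instance

-- ===== CLAIM (what is proved, stated in full; the proofs are below) =====
def Claim_equal_square_board : Prop := ∀ (side : Int) (token : Int) (steps : Int), Dom_square_board side token steps → Pre_square_board side token steps → Spec_square_board side token steps (square_board side token steps)

-- ===== LEMMAS AND PROOFS =====

/-- A fold that inserts `f i` at key `i` for every `i` of a list answers `f k`
for any key `k` that is in the list (or was already correctly mapped). -/
lemma get?_foldl_insert_fn (f : Int → Int × Int) :
    ∀ (l : List Int) (d : Std.HashMap Int (Int × Int)) (k : Int),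
      (k ∈ l ∨ d[k]? = some (f k)) →
      (l.foldl (fun d i => d.insert i (f i)) d)[k]? = some (f k) := by
  intro l
  induction l with
  | nil =>
    intro d k h
    simpa using h.resolve_left (by simp)
  | cons x xs ih =>
    intro d k h
    simp only [List.foldl_cons]
    apply ih
    by_cases hk : k = x
    · subst hk
      exact Or.inr (by simp)
    · rcases h with h | h
      · rcases List.mem_cons.mp h with h | h
        · exact absurd h hk
        · exact Or.inl h
      · refine Or.inr ?_
        rw [Std.HashMap.getElem?_insert]
        simpa [Ne.symm hk] using h

-- ===== VERDICT (by name: the statement is the Claim_ definition above) =====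
theorem square_board_spec : Claim_equal_square_board := by
  intro side token steps _ hpre
  unfold Spec_square_board square_board square_board_alt
  have hside : 2 ≤ side := hpre
  have hp : (0 : Int) < 4 * side - 4 := by omega
  -- A side: the +10*perimeter offset vanishes mod perimeter
  have hmod : PySem.Int.mod (token + steps + 10 * (4 * side - 4)) (4 * side - 4)
      = PySem.Int.mod (token + steps) (4 * side - 4) := by
    rw [PySem.Int.mod_eq_emod_of_pos hp, PySem.Int.mod_eq_emod_of_pos hp]
    exact Int.add_mul_emod_self_right _ 10 _
  have hm4 : 4 * (side - 1) = 4 * side - 4 := by ring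
  set f : Int := PySem.Int.mod (token + steps) (4 * side - 4) with hfdef
  have h0 : 0 ≤ f := by
    rw [hfdef, PySem.Int.mod_eq_emod_of_pos hp]; exact Int.emod_nonneg _ (by omega)
  have h1 : f < 4 * side - 4 := by
    rw [hfdef, PySem.Int.mod_eq_emod_of_pos hp]; exact Int.emod_lt_of_pos _ hp
  simp only [hmod, hm4]
  -- reduce A's dict lookup to the branch value at f
  have hfun : (fun (d : Std.HashMap Int (Int × Int)) (i : Int) =>
      if i < side then d.insert i (side - 1, side - 1 - i)
      else if i < 2 * side - 1 then d.insert i (2 * side - 2 - i, 0)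
      else if i < 3 * side - 2 then d.insert i (0, i - 2 * side + 2)
      else d.insert i (i - 3 * side + 3, side - 1))
    = (fun (d : Std.HashMap Int (Int × Int)) (i : Int) =>
      d.insert i (if i < side then (side - 1, side - 1 - i)
        else if i < 2 * side - 1 then (2 * side - 2 - i, 0)
        else if i < 3 * side - 2 then (0, i - 2 * side + 2)
        else (i - 3 * side + 3, side - 1))) := by
    funext d i; split_ifs <;> rfl
  rw [hfun]
  rw [get?_foldl_insert_fn
      (fun i => if i < side then (side - 1, side - 1 - i)
        else if i < 2 * side - 1 then (2 * side - 2 - i, 0)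
        else if i < 3 * side - 2 then (0, i - 2 * side + 2)
        else (i - 3 * side + 3, side - 1))
      (PySem.List.pyRange 0 (4 * side - 4) 1) Std.HashMap.emptyWithCapacity f
      (Or.inl ((PySem.List.mem_pyRange_one).2 ⟨h0, h1⟩))]
  simp only [Option.getD_some]
  -- B side: name q and r and get the Euclidean facts
  have hm : (0 : Int) < side - 1 := by omega
  set q : Int := PySem.Int.floordiv f (side - 1) with hqdef
  set r : Int := PySem.Int.mod f (side - 1) with hrdef
  have hq : q = f / (side - 1) := by rw [hqdef, PySem.Int.floordiv_eq_ediv_of_pos hm]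
  have hr : r = f % (side - 1) := by rw [hrdef, PySem.Int.mod_eq_emod_of_pos hm]
  have hr0 : 0 ≤ r := by rw [hr]; exact Int.emod_nonneg _ (by omega)
  have hr1 : r < side - 1 := by rw [hr]; exact Int.emod_lt_of_pos _ hm
  have hfq : f = q * (side - 1) + r := by
    rw [hq, hr, Int.mul_comm]; exact (Int.ediv_add_emod f (side - 1)).symm
  have hq0 : 0 ≤ q := by rw [hq]; exact Int.ediv_nonneg h0 (by omega)
  have hq4 : q < 4 := by
    by_contra h
    have : 4 ≤ q := by omega
    nlinarith [hfq, h1, hr0, hm]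
  -- q ∈ {0,1,2,3}: evaluate the table lookups and compare branch by branch
  interval_cases q <;>
    simp only [PySem.List.pyGet?, PySem.List.pyIdx?] <;>
    norm_num [Option.getD_some, show ((2:Int).toNat) = 2 from rfl, show ((3:Int).toNat) = 3 from rfl] <;>
    split_ifs <;>
    (first
      | (exfalso; omega)
      | (rw [Prod.mk.injEq]; exact ⟨by omega, by omega⟩))
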